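-- pv_equiv track=rewrite | github.com/longyijdos/Artisan | agent/services/workspace/file_ops.py | _ascii_filename_fallback
-- ===== SOURCE A (Python) =====
-- def _ascii_filename_fallback(filename: str) -> str:
--     """Build an ASCII-safe fallback filename for HTTP headers."""
--     safe_chars = []
--     for ch in filename:
--         code = ord(ch)
--         if 32 <= code <= 126 and ch not in {'"', "\\"}:
--             safe_chars.append(ch)
--         else:
--             safe_chars.append("_")
--     fallback = "".join(safe_chars).strip(" .")
--     return fallback or "download"
-- ===== SOURCE B (Python) =====
-- def _ascii_filename_fallback(filename: str) -> str:
--     """Build an ASCII-safe fallback filename for HTTP headers."""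
--     # Strip ' .' from the raw input first (safe: ' ' and '.' are kept verbatim
--     # by sanitization and '_' is never produced for them, so strip commutes),
--     # then split the core into maximal runs of safe characters and join the
--     # runs with '_' -- one '_' per unsafe character.
--     core = filename.strip(" .")
--     runs = []
--     cur = ""
--     for ch in core:
--         if " " <= ch <= "~" and ch != '"' and ch != "\\":
--             cur += ch
--         else:
--             runs.append(cur)
--             cur = ""
--     runs.append(cur)
--     return "_".join(runs) or "download"
-- ===== Notes on version B (the rewrite author's own statement) =====
-- stated objective: alternative
-- what changed: B strips ' .' from the raw input first (proving strip commutes with sanitization) and then splits the core into maximal runs of safe characters joined with '_', instead of A's per-character append loop followed by a final strip.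
import Mathlib
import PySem

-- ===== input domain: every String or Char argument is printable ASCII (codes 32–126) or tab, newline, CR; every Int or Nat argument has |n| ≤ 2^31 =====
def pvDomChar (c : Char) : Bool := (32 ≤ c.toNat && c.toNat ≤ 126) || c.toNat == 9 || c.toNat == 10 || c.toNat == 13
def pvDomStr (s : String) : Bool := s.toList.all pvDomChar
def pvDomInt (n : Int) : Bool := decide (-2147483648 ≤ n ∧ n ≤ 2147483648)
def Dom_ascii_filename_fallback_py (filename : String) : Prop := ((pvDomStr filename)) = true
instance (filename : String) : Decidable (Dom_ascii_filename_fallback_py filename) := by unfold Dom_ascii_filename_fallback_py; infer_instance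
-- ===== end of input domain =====

-- B strips " ." from the raw input first (strip commutes with sanitization) and then
-- splits the core into maximal safe runs joined with "_", instead of A's per-character
-- map followed by strip (objective: alternative — same cost class, different strategy).

-- ===== PORT A =====
-- literal port: per-character loop appending either the char or '_' to an accumulator,
-- then "".join(...).strip(" .") and the `or "download"` fallback
def ascii_filename_fallback_py (filename : String) : String :=
  let safe_chars : List Char :=
    filename.toList.foldl (fun acc ch =>
      let code := ch.toNat
      if (32 ≤ code && code ≤ 126) && !(ch == '"' || ch == '\\') then acc ++ [ch]
      else acc ++ ['_']) []
  let fallback := PySem.Chars.stripChars safe_chars (" .".toList)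
  if fallback.isEmpty then "download" else String.ofList fallback

-- ===== PORT B =====
-- port of Source B: core = filename.strip(" ."); then one loop over core maintaining
-- (runs, cur) — the finished safe runs and the current run; an unsafe char closes the
-- current run; finally "_".join(runs ++ [cur]) and the `or "download"` fallback
def ascii_filename_fallback_py_alt (filename : String) : String :=
  let core := PySem.Chars.stripChars filename.toList (" .".toList)
  let st := core.foldl (fun (st : List (List Char) × List Char) ch =>
      if (' ' ≤ ch && ch ≤ '~') && ch != '"' && ch != '\\' then (st.1, st.2 ++ [ch])
      else (st.1 ++ [st.2], [])) ([], [])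
  let joined := PySem.Chars.join ['_'] (st.1 ++ [st.2])
  if joined.isEmpty then "download" else String.ofList joined

-- ===== PRECONDITION & SPEC =====
def Spec_ascii_filename_fallback_py (filename : String) (out : String) : Prop := out = ascii_filename_fallback_py_alt filename
instance (filename : String) (out : String) : Decidable (Spec_ascii_filename_fallback_py filename out) := by unfold Spec_ascii_filename_fallback_py; infer_instance

-- ===== CLAIM =====
def Claim_equal_ascii_filename_fallback_py : Prop := ∀ (filename : String), Dom_ascii_filename_fallback_py filename → Spec_ascii_filename_fallback_py filename (ascii_filename_fallback_py filename)

-- ===== LEMMAS AND PROOFS =====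

-- the sanitizing character map both programs realise
def pvSan (ch : Char) : Char :=
  if (' ' ≤ ch && ch ≤ '~') && ch != '"' && ch != '\\' then ch else '_'

-- A's branch condition equals B's (char comparison ↔ code-point comparison)
theorem pv_condA_eq (ch : Char) :
    ((32 ≤ ch.toNat && ch.toNat ≤ 126) && !(ch == '"' || ch == '\\'))
      = ((' ' ≤ ch && ch ≤ '~') && ch != '"' && ch != '\\') := by
  have hlo : decide (' ' ≤ ch) = decide (32 ≤ ch.toNat) := by
    apply decide_eq_decide.mpr
    rw [Char.le_def, UInt32.le_iff_toNat_le]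
    exact Iff.rfl
  have hhi : decide (ch ≤ '~') = decide (ch.toNat ≤ 126) := by
    apply decide_eq_decide.mpr
    rw [Char.le_def, UInt32.le_iff_toNat_le]
    exact Iff.rfl
  rw [hlo, hhi, bne, bne, Bool.not_or]
  simp [Bool.and_assoc]

theorem pv_foldl_append (l : List Char) (f : Char → Char) (init : List Char) :
    l.foldl (fun acc x => acc ++ [f x]) init = init ++ l.map f := by
  induction l generalizing init with
  | nil => simp
  | cons a t ih => simp [List.foldl, ih]

-- A's loop builds the sanitized map
theorem pv_A_loop (l : List Char) :
    l.foldl (fun acc ch =>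
      if (32 ≤ ch.toNat && ch.toNat ≤ 126) && !(ch == '"' || ch == '\\') then acc ++ [ch]
      else acc ++ ['_']) [] = l.map pvSan := by
  rw [show (fun acc ch =>
      if (32 ≤ ch.toNat && ch.toNat ≤ 126) && !(ch == '"' || ch == '\\') then acc ++ [ch]
      else acc ++ ['_']) = (fun (acc : List Char) ch => acc ++ [pvSan ch])
    from by
      funext acc ch
      rw [pv_condA_eq ch]
      unfold pvSan
      split_ifs <;> rfl]
  simpa using pv_foldl_append l pvSan []

-- ' ' and '.' are kept verbatim by pvSan and '_' is never produced for them
theorem pv_strip_contains (ch : Char) :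
    ([' ', '.'] : List Char).contains (pvSan ch) = [' ', '.'].contains ch := by
  unfold pvSan
  split_ifs with h
  · rfl
  · by_cases hs : ch = ' '
    · exact absurd (by subst hs; decide) h
    · by_cases hd : ch = '.'
      · exact absurd (by subst hd; decide) h
      · simp [List.contains_eq_mem, hs, hd]

-- strip(" .") commutes with sanitization
theorem pv_strip_comm (l : List Char) :
    PySem.Chars.stripChars (l.map pvSan) (" .".toList)
      = (PySem.Chars.stripChars l (" .".toList)).map pvSan := by
  have hpred : (fun c => (" .".toList).contains c) ∘ pvSan
      = fun c => (" .".toList).contains c := by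
    funext c
    have h2 : (" .".toList : List Char) = [' ', '.'] := rfl
    simpa [h2] using pv_strip_contains c
  show (List.dropWhile (fun c => (" .".toList).contains c)
          ((List.dropWhile (fun c => (" .".toList).contains c) (l.map pvSan)).reverse)).reverse
      = ((List.dropWhile (fun c => (" .".toList).contains c)
          ((List.dropWhile (fun c => (" .".toList).contains c) l).reverse)).reverse).map pvSan
  rw [List.dropWhile_map, hpred, ← List.map_reverse, List.dropWhile_map, hpred, List.map_reverse]

theorem pv_ic_cc (sep u v : List Char) (w : List (List Char)) :
    List.intercalate sep (u :: v :: w) = u ++ sep ++ List.intercalate sep (v :: w) := by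
  simp [List.intercalate, List.intersperse]

-- appending to the last run appends to the joined result
theorem pv_intercalate_last (sep : List Char) (R : List (List Char)) (x y : List Char) :
    List.intercalate sep (R ++ [x ++ y]) = List.intercalate sep (R ++ [x]) ++ y := by
  induction R with
  | nil => simp [List.intercalate]
  | cons a t ih =>
    rcases t with _ | ⟨b, t⟩
    · simp [List.intercalate, List.intersperse, List.append_assoc]
    · rw [show (a :: b :: t) ++ [x ++ y] = a :: ((b :: t) ++ [x ++ y]) from rfl,
          show (b :: t) ++ [x ++ y] = b :: (t ++ [x ++ y]) from rfl, pv_ic_cc,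
          show b :: (t ++ [x ++ y]) = (b :: t) ++ [x ++ y] from rfl, ih,
          show (a :: b :: t) ++ [x] = a :: (b :: (t ++ [x])) from rfl, pv_ic_cc]
      simp [List.append_assoc]

-- closing a run (appending an empty run) appends a separator
theorem pv_intercalate_close (sep : List Char) (L : List (List Char)) (h : L ≠ []) :
    List.intercalate sep (L ++ [[]]) = List.intercalate sep L ++ sep := by
  induction L with
  | nil => exact absurd rfl h
  | cons a t ih =>
    rcases t with _ | ⟨b, t⟩
    · simp [List.intercalate, List.intersperse]
    · rw [show (a :: b :: t) ++ [[]] = a :: ((b :: t) ++ [[]]) from rfl,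
          show (b :: t) ++ [[]] = b :: (t ++ [[]]) from rfl, pv_ic_cc,
          show b :: (t ++ [[]]) = (b :: t) ++ [[]] from rfl, ih (by simp), pv_ic_cc]
      simp [List.append_assoc]

-- B's loop invariant: joining the state reproduces the sanitized map
theorem pv_B_loop (l : List Char) (R : List (List Char)) (cur : List Char) :
    PySem.Chars.join ['_']
      ((l.foldl (fun (st : List (List Char) × List Char) ch =>
          if (' ' ≤ ch && ch ≤ '~') && ch != '"' && ch != '\\' then (st.1, st.2 ++ [ch])
          else (st.1 ++ [st.2], [])) (R, cur)).1
        ++ [(l.foldl (fun (st : List (List Char) × List Char) ch =>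
          if (' ' ≤ ch && ch ≤ '~') && ch != '"' && ch != '\\' then (st.1, st.2 ++ [ch])
          else (st.1 ++ [st.2], [])) (R, cur)).2])
      = PySem.Chars.join ['_'] (R ++ [cur]) ++ l.map pvSan := by
  induction l generalizing R cur with
  | nil => simp
  | cons a t ih =>
    simp only [List.foldl_cons, List.map_cons]
    by_cases h : ((' ' ≤ a && a ≤ '~') && a != '"' && a != '\\') = true
    · rw [if_pos h, ih]
      have ha : pvSan a = a := by unfold pvSan; rw [if_pos h]
      rw [ha]
      unfold PySem.Chars.join
      rw [pv_intercalate_last]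
      simp
    · rw [if_neg h, ih]
      have ha : pvSan a = '_' := by unfold pvSan; rw [if_neg h]
      rw [ha]
      unfold PySem.Chars.join
      rw [pv_intercalate_close ['_'] (R ++ [cur]) (by simp)]
      simp

-- ===== VERDICT =====
theorem ascii_filename_fallback_py_spec : Claim_equal_ascii_filename_fallback_py := by
  intro filename _
  unfold Spec_ascii_filename_fallback_py
  simp only [ascii_filename_fallback_py, ascii_filename_fallback_py_alt]
  rw [pv_A_loop, pv_strip_comm]
  have hB := pv_B_loop (PySem.Chars.stripChars filename.toList (" .".toList)) [] []
  simp only [List.nil_append] at hB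
  rw [hB]
  simp [PySem.Chars.join, List.intercalate]
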